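-- pv_equiv track=rewrite | github.com/ISUCT/Algorythm_Python_2022 | src/algorithm_string/cyclic_shift.py | get_shift_size
-- ===== SOURCE A (Python) =====
-- def get_shift_size(first_string, second_string):
--     if second_string == first_string:
--         return 0
--
--     second_string *= 2
--
--     p = 13
--     m = 1
--     q = 2**31 - 1
--
--     first_hash = 0
--     second_hash = 0
--     xt = 1
--
--     for i in first_string[::-1]:
--         first_hash = (first_hash + ord(i) * m) % q
--         m = (m * p) % q
--
--     m = 1
--     for i in second_string[:len(first_string)][::-1]:
--         second_hash = (second_hash + ord(i) * m) % q
--         m = (m * p) % q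
--
--     for i in range(len(first_string) - 1):
--         xt = (xt * p) % q
--
--     for i in range(1, len(second_string) - len(first_string) + 1):
--         if second_hash == first_hash:
--             return i - 1
--
--         second_hash = p * (second_hash - ord(second_string[i - 1]) * xt)
--         second_hash += ord(second_string[i + len(first_string) - 1])
--         second_hash %= q
--
--     return -1
-- ===== SOURCE B (Python) =====
-- def get_shift_size(first_string, second_string):
--     if second_string == first_string:
--         return 0
--
--     q = 2**31 - 1
--     n = len(first_string)
--     doubled = second_string * 2
--
--     target = 0
--     for c in first_string:
--         target = (target * 13 + ord(c)) % q
--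
--     prefix = [0]
--     h = 0
--     for c in doubled:
--         h = (h * 13 + ord(c)) % q
--         prefix.append(h)
--
--     pw = 1
--     for _ in range(n):
--         pw = pw * 13 % q
--
--     for pos in range(len(doubled) - n):
--         if (prefix[pos + n] - prefix[pos] * pw) % q == target:
--             return pos
--     return -1
-- ===== Notes on version B (the rewrite author's own statement) =====
-- stated objective: alternative
-- what changed: Replaces A's maintained rolling-hash state (incremental subtract/shift/add update per position, plus two reversed-order hashing loops) with a precomputed prefix-hash table from which each window's hash is read directly by one modular formula (prefix[p+n] - prefix[p]*13^n mod q), scanning the same positions of the doubled string.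
import Mathlib
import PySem

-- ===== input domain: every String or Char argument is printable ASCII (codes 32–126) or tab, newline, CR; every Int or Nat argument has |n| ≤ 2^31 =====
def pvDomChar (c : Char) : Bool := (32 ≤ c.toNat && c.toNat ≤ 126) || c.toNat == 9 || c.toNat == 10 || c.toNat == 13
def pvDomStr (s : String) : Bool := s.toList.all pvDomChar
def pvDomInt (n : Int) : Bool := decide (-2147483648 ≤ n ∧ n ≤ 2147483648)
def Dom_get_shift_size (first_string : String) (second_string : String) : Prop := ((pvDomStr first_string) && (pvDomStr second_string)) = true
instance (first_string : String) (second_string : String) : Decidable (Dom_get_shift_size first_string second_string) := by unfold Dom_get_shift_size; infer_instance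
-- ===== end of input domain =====

-- B replaces A's maintained rolling-hash state (incremental subtract/shift/add updates) by a
-- precomputed prefix-hash table, reading each window's hash directly by one modular formula;
-- same results (including the early 0 on equal strings), alternative algorithm of the same cost.

def pvOrd (c : Char) : Int := (c.toNat : Int)
def pvQ : Int := 2147483647

-- ===== PORT A =====
-- the two reversed hashing loops of A (state = (hash, m)):
def pvFoldA (r : List Char) (st : Int × Int) : Int × Int :=
  match r with
  | [] => st
  | c :: rest =>
      pvFoldA rest (PySem.Int.mod (st.1 + pvOrd c * st.2) pvQ, PySem.Int.mod (st.2 * 13) pvQ)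

-- A's final scanning loop with its rolling update (early return = stop the recursion):
def pvLoopA (f s2 : List Char) (xt fh sh : Int) (is : List Int) : Int :=
  match is with
  | [] => -1
  | i :: rest =>
      if sh == fh then i - 1
      else
        pvLoopA f s2 xt fh
          (PySem.Int.mod
            (13 * (sh - pvOrd (PySem.List.pyGetD s2 (i - 1) ' ') * xt)
              + pvOrd (PySem.List.pyGetD s2 (i + (f.length : Int) - 1) ' ')) pvQ)
          rest

def get_shift_size (first_string : String) (second_string : String) : Int :=
  if second_string == first_string then 0
  else
    let f := first_string.toList
    let s2 := second_string.toList ++ second_string.toList   -- second_string *= 2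
    let first_hash := (pvFoldA f.reverse (0, 1)).1
    let second_hash := (pvFoldA (PySem.List.slice s2 none (some (f.length : Int))).reverse (0, 1)).1
    let xt := (PySem.List.pyRange 0 ((f.length : Int) - 1) 1).foldl
                (fun x _ => PySem.Int.mod (x * 13) pvQ) 1
    pvLoopA f s2 xt first_hash second_hash
      (PySem.List.pyRange 1 ((s2.length : Int) - (f.length : Int) + 1) 1)

-- ===== PORT B =====
-- building the prefix-hash table (state = (prefix, h)):
def pvPrefixFold (l : List Char) (st : List Int × Int) : List Int × Int :=
  match l with
  | [] => st
  | c :: rest =>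
      let h := PySem.Int.mod (st.2 * 13 + pvOrd c) pvQ
      pvPrefixFold rest (st.1 ++ [h], h)

-- B's scan: each window hash read off the prefix table (early return = stop the recursion):
def pvScanB (pre : List Int) (n pw target : Int) (ps : List Int) : Int :=
  match ps with
  | [] => -1
  | pos :: rest =>
      if PySem.Int.mod (PySem.List.pyGetD pre (pos + n) 0 - PySem.List.pyGetD pre pos 0 * pw) pvQ
           == target then pos
      else pvScanB pre n pw target rest

def get_shift_size_alt (first_string : String) (second_string : String) : Int :=
  if second_string == first_string then 0
  else
    let f := first_string.toList
    let doubled := second_string.toList ++ second_string.toList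
    let target := f.foldl (fun v c => PySem.Int.mod (v * 13 + pvOrd c) pvQ) 0
    let pre := (pvPrefixFold doubled ([0], 0)).1
    let pw := (PySem.List.pyRange 0 ((f.length : Int)) 1).foldl
                (fun x _ => PySem.Int.mod (x * 13) pvQ) 1
    pvScanB pre (f.length : Int) pw target
      (PySem.List.pyRange 0 ((doubled.length : Int) - (f.length : Int)) 1)

-- ===== PRECONDITION & SPEC =====
def Spec_get_shift_size (first_string : String) (second_string : String) (out : Int) : Prop := out = get_shift_size_alt first_string second_string
instance (first_string : String) (second_string : String) (out : Int) : Decidable (Spec_get_shift_size first_string second_string out) := by unfold Spec_get_shift_size; infer_instance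

-- ===== CLAIM (what is proved, stated in full; the proofs are below) =====
def Claim_equal_get_shift_size : Prop := ∀ (first_string : String) (second_string : String), Dom_get_shift_size first_string second_string → Spec_get_shift_size first_string second_string (get_shift_size first_string second_string)

-- ===== LEMMAS AND PROOFS =====

-- the pure (un-modded) polynomial hash, front-first (Horner), from seed v
def pvP (v : Int) : List Char → Int
  | [] => v
  | c :: l => pvP (v * 13 + pvOrd c) l

-- the same polynomial read back-to-front: pvR r = sum of ord r_k * 13^k
def pvR : List Char → Int
  | [] => 0
  | c :: r => pvOrd c + 13 * pvR r

-- the modded Horner fold (B's hashing loop body) from seed h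
def pvHm (h : Int) : List Char → Int
  | [] => h
  | c :: l => pvHm (PySem.Int.mod (h * 13 + pvOrd c) pvQ) l

-- the pure prefix stream of modded hashes (what pvPrefixFold appends)
def pvWinPref (h : Int) : List Char → List Int
  | [] => []
  | c :: l =>
      PySem.Int.mod (h * 13 + pvOrd c) pvQ
        :: pvWinPref (PySem.Int.mod (h * 13 + pvOrd c) pvQ) l

theorem pvMod_eq (x : Int) : PySem.Int.mod x pvQ = x % pvQ :=
  PySem.Int.mod_eq_emod_of_pos (by norm_num [pvQ])

theorem pvQ_pos : (0 : Int) < pvQ := by norm_num [pvQ]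

theorem pvHm_foldl (l : List Char) (h : Int) :
    l.foldl (fun v c => PySem.Int.mod (v * 13 + pvOrd c) pvQ) h = pvHm h l := by
  induction l generalizing h with
  | nil => rfl
  | cons c l ih => simp [pvHm, ih]

theorem pvP_append (v : Int) (u w : List Char) : pvP v (u ++ w) = pvP (pvP v u) w := by
  induction u generalizing v with
  | nil => rfl
  | cons c u ih => simp [pvP, ih]

theorem pvP_append_singleton (v : Int) (u : List Char) (c : Char) :
    pvP v (u ++ [c]) = pvP v u * 13 + pvOrd c := by
  rw [pvP_append]; rfl

theorem pvR_append (r : List Char) (c : Char) :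
    pvR (r ++ [c]) = pvR r + pvOrd c * 13 ^ r.length := by
  induction r with
  | nil => simp [pvR]
  | cons d r ih => simp [pvR, ih, pow_succ]; ring

theorem pvP_eq (l : List Char) (v : Int) :
    pvP v l = v * 13 ^ l.length + pvR l.reverse := by
  induction l generalizing v with
  | nil => simp [pvP, pvR]
  | cons c l ih =>
      show pvP (v * 13 + pvOrd c) l = _
      rw [ih]
      simp [List.reverse_cons, pvR_append, pow_succ]
      ring

theorem pvP_zero (l : List Char) : pvP 0 l = pvR l.reverse := by
  simpa using pvP_eq l 0

-- B's hashing loop computes the canonical residue of the pure polynomial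
theorem pvHm_eq (l : List Char) (v : Int) : pvHm (v % pvQ) l = pvP v l % pvQ := by
  induction l generalizing v with
  | nil => rfl
  | cons c l ih =>
      show pvHm (PySem.Int.mod ((v % pvQ) * 13 + pvOrd c) pvQ) l = pvP (v * 13 + pvOrd c) l % pvQ
      rw [pvMod_eq]
      have h1 : ((v % pvQ) * 13 + pvOrd c) % pvQ = (v * 13 + pvOrd c) % pvQ := by
        have hv : v % pvQ ≡ v [ZMOD pvQ] := Int.emod_emod_of_dvd v dvd_rfl
        exact (hv.mul_right 13).add_right (pvOrd c)
      rw [h1]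
      exact ih (v * 13 + pvOrd c)

theorem pvHm_zero (l : List Char) : pvHm 0 l = pvP 0 l % pvQ := by
  have := pvHm_eq l 0
  rwa [Int.zero_emod] at this

-- A's reversed hashing loop: congruence of the first component
theorem pvFoldA_congr (r : List Char) (h m : Int) :
    (pvFoldA r (h, m)).1 % pvQ = (h + m * pvR r) % pvQ := by
  induction r generalizing h m with
  | nil => simp [pvFoldA, pvR]
  | cons c r ih =>
      show (pvFoldA r (PySem.Int.mod (h + pvOrd c * m) pvQ, PySem.Int.mod (m * 13) pvQ)).1 % pvQ = _
      rw [ih, pvMod_eq, pvMod_eq]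
      have h1 : (h + pvOrd c * m) % pvQ ≡ h + pvOrd c * m [ZMOD pvQ] :=
        Int.emod_emod_of_dvd _ dvd_rfl
      have h2 : (m * 13) % pvQ ≡ m * 13 [ZMOD pvQ] := Int.emod_emod_of_dvd _ dvd_rfl
      have h3 : (h + pvOrd c * m) % pvQ + (m * 13) % pvQ * pvR r
          ≡ (h + pvOrd c * m) + m * 13 * pvR r [ZMOD pvQ] := h1.add (h2.mul_right (pvR r))
      calc ((h + pvOrd c * m) % pvQ + (m * 13) % pvQ * pvR r) % pvQ
          = ((h + pvOrd c * m) + m * 13 * pvR r) % pvQ := h3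
        _ = (h + m * pvR (c :: r)) % pvQ := by simp [pvR]; congr 1; ring

theorem pvFoldA_range (r : List Char) (h m : Int) (hh : 0 ≤ h ∧ h < pvQ) :
    0 ≤ (pvFoldA r (h, m)).1 ∧ (pvFoldA r (h, m)).1 < pvQ := by
  induction r generalizing h m with
  | nil => exact hh
  | cons c r ih =>
      exact ih _ _ ⟨by rw [pvMod_eq]; exact Int.emod_nonneg _ (by norm_num [pvQ]),
                    by rw [pvMod_eq]; exact Int.emod_lt_of_pos _ pvQ_pos⟩

theorem pvFoldA_canon (r : List Char) : (pvFoldA r (0, 1)).1 = pvR r % pvQ := by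
  have hr := pvFoldA_range r 0 1 ⟨le_refl 0, pvQ_pos⟩
  rw [← Int.emod_eq_of_lt hr.1 hr.2, pvFoldA_congr]
  congr 1
  ring

-- the power loops of both ports
theorem pvPow_fold (k : Nat) :
    (PySem.List.pyRange 0 (k : Int) 1).foldl (fun x _ => PySem.Int.mod (x * 13) pvQ) 1
      = 13 ^ k % pvQ := by
  induction k with
  | zero =>
      rw [PySem.List.pyRange_one_eq_nil (by norm_num)]
      decide
  | succ k ih =>
      have hc : ((k + 1 : Nat) : Int) = (k : Int) + 1 := by push_cast; ring
      rw [hc, PySem.List.pyRange_one_succ_right (by positivity), List.foldl_append, ih]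
      show PySem.Int.mod (13 ^ k % pvQ * 13) pvQ = 13 ^ (k + 1) % pvQ
      rw [pvMod_eq]
      have h1 : 13 ^ k % pvQ ≡ 13 ^ k [ZMOD pvQ] := Int.emod_emod_of_dvd _ dvd_rfl
      calc (13 ^ k % pvQ * 13) % pvQ = (13 ^ k * 13) % pvQ := h1.mul_right 13
        _ = 13 ^ (k + 1) % pvQ := by rw [pow_succ]

theorem pvXt_val (L : Nat) :
    (PySem.List.pyRange 0 ((L : Int) - 1) 1).foldl (fun x _ => PySem.Int.mod (x * 13) pvQ) 1
      = 13 ^ (L - 1) % pvQ := by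
  cases L with
  | zero =>
      rw [PySem.List.pyRange_one_eq_nil (by norm_num)]
      decide
  | succ n =>
      have hc : ((n + 1 : Nat) : Int) - 1 = (n : Int) := by push_cast; ring
      rw [hc, pvPow_fold n]
      simp

-- prefix list facts
theorem pvPrefixFold_fst (l : List Char) (acc : List Int) (h : Int) :
    (pvPrefixFold l (acc, h)).1 = acc ++ pvWinPref h l := by
  induction l generalizing acc h with
  | nil => simp [pvPrefixFold, pvWinPref]
  | cons c l ih =>
      show (pvPrefixFold l (acc ++ [PySem.Int.mod (h * 13 + pvOrd c) pvQ], _)).1 = _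
      rw [ih]
      simp [pvWinPref]

theorem pvWinPref_getElem (l : List Char) (h : Int) (i : Nat) (hi : i < l.length) :
    (pvWinPref h l)[i]? = some (pvHm h (l.take (i + 1))) := by
  induction l generalizing h i with
  | nil => simp at hi
  | cons c l ih =>
      cases i with
      | zero => simp [pvWinPref, pvHm]
      | succ i =>
          show (pvWinPref h (c :: l))[i + 1]? = _
          rw [pvWinPref]
          rw [List.getElem?_cons_succ]
          rw [ih _ i (by simpa using hi)]
          rfl

theorem pvPrefix_getD (s2 : List Char) (i : Nat) (hi : i ≤ s2.length) :
    (0 :: pvWinPref 0 s2).getD i 0 = pvP 0 (s2.take i) % pvQ := by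
  cases i with
  | zero => simp [pvP]
  | succ i =>
      rw [List.getD_cons_succ, List.getD_eq_getElem?_getD,
          pvWinPref_getElem s2 0 i (by omega)]
      simp [pvHm_zero]

-- B's window formula reads the canonical window hash
theorem pvWin_val (s2 f : List Char) (t : Nat) (ht : t + f.length ≤ s2.length) :
    PySem.Int.mod
        (PySem.List.pyGetD (0 :: pvWinPref 0 s2) ((t : Int) + (f.length : Int)) 0
          - PySem.List.pyGetD (0 :: pvWinPref 0 s2) (t : Int) 0 * (13 ^ f.length % pvQ)) pvQ
      = pvP 0 ((s2.drop t).take f.length) % pvQ := by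
  have hc : (t : Int) + (f.length : Int) = ((t + f.length : Nat) : Int) := by push_cast; ring
  rw [hc, PySem.List.pyGetD_natCast, PySem.List.pyGetD_natCast,
      pvPrefix_getD s2 (t + f.length) ht, pvPrefix_getD s2 t (by omega), pvMod_eq]
  have hsplit : s2.take (t + f.length) = s2.take t ++ (s2.drop t).take f.length :=
    List.take_add
  have hlen : ((s2.drop t).take f.length).length = f.length := by
    simp [List.length_take, List.length_drop]; omega
  have hdec : pvP 0 (s2.take (t + f.length))
      = pvP 0 (s2.take t) * 13 ^ f.length + pvP 0 ((s2.drop t).take f.length) := by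
    rw [hsplit, pvP_append, pvP_eq, hlen]
    simp [pvP_zero]
  have h1 : pvP 0 (s2.take (t + f.length)) % pvQ ≡ pvP 0 (s2.take (t + f.length)) [ZMOD pvQ] :=
    Int.emod_emod_of_dvd _ dvd_rfl
  have h2 : pvP 0 (s2.take t) % pvQ ≡ pvP 0 (s2.take t) [ZMOD pvQ] :=
    Int.emod_emod_of_dvd _ dvd_rfl
  have h3 : (13 : Int) ^ f.length % pvQ ≡ 13 ^ f.length [ZMOD pvQ] :=
    Int.emod_emod_of_dvd _ dvd_rfl
  calc (pvP 0 (s2.take (t + f.length)) % pvQ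
          - pvP 0 (s2.take t) % pvQ * (13 ^ f.length % pvQ)) % pvQ
      = (pvP 0 (s2.take (t + f.length)) - pvP 0 (s2.take t) * 13 ^ f.length) % pvQ :=
        h1.sub (h2.mul h3)
    _ = pvP 0 ((s2.drop t).take f.length) % pvQ := by rw [hdec]; congr 1; ring

-- A's rolling update moves the canonical window hash one step right
theorem pvRoll (s2 f : List Char) (t : Nat) (ht : t + f.length < s2.length) (hf : f ≠ []) :
    PySem.Int.mod
        (13 * (pvP 0 ((s2.drop t).take f.length) % pvQ
              - pvOrd (PySem.List.pyGetD s2 ((t : Int) + 1 - 1) ' ') * (13 ^ (f.length - 1) % pvQ))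
          + pvOrd (PySem.List.pyGetD s2 ((t : Int) + 1 + (f.length : Int) - 1) ' ')) pvQ
      = pvP 0 ((s2.drop (t + 1)).take f.length) % pvQ := by
  obtain ⟨M, hM⟩ : ∃ M, f.length = M + 1 :=
    ⟨f.length - 1, by have := List.length_pos_of_ne_nil hf; omega⟩
  have hc1 : (t : Int) + 1 - 1 = ((t : Nat) : Int) := by ring
  have hc2 : (t : Int) + 1 + (f.length : Int) - 1 = ((t + f.length : Nat) : Int) := by
    push_cast; ring
  rw [hc1, hc2, PySem.List.pyGetD_natCast, PySem.List.pyGetD_natCast, pvMod_eq, hM]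
  simp only [Nat.add_sub_cancel]
  rw [List.getD_eq_getElem s2 ' ' (by omega), List.getD_eq_getElem s2 ' ' (by omega)]
  have hdrop : s2.drop t = s2[t] :: s2.drop (t + 1) := List.drop_eq_getElem_cons (by omega)
  have hmidlen : ((s2.drop (t + 1)).take M).length = M := by
    simp [List.length_take, List.length_drop]; omega
  have hwin : (s2.drop t).take (M + 1) = s2[t] :: (s2.drop (t + 1)).take M := by
    rw [hdrop, List.take_succ_cons]
  have hnext : (s2.drop (t + 1)).take (M + 1)
      = (s2.drop (t + 1)).take M ++ [s2[t + (M + 1)]] := by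
    rw [List.take_add_one]
    congr 1
    rw [List.getElem?_drop, show t + 1 + M = t + (M + 1) by omega,
        List.getElem?_eq_getElem (by omega)]
    rfl
  have hval1 : pvP 0 ((s2.drop t).take (M + 1))
      = pvOrd s2[t] * 13 ^ M + pvR ((s2.drop (t + 1)).take M).reverse := by
    rw [hwin]
    show pvP (0 * 13 + pvOrd s2[t]) _ = _
    rw [pvP_eq, hmidlen]
    ring
  have hval2 : pvP 0 ((s2.drop (t + 1)).take (M + 1))
      = pvR ((s2.drop (t + 1)).take M).reverse * 13 + pvOrd s2[t + (M + 1)] := by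
    rw [hnext, pvP_append_singleton, pvP_zero]
  rw [hval1, hval2]
  have h1 : (pvOrd s2[t] * 13 ^ M + pvR ((s2.drop (t + 1)).take M).reverse) % pvQ
      ≡ pvOrd s2[t] * 13 ^ M + pvR ((s2.drop (t + 1)).take M).reverse [ZMOD pvQ] :=
    Int.emod_emod_of_dvd _ dvd_rfl
  have h2 : (13 : Int) ^ M % pvQ ≡ 13 ^ M [ZMOD pvQ] := Int.emod_emod_of_dvd _ dvd_rfl
  have h3 := ((h1.sub (h2.mul_left (pvOrd s2[t]))).mul_left 13).add_right
    (pvOrd s2[t + (M + 1)])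
  calc (13 * ((pvOrd s2[t] * 13 ^ M + pvR ((s2.drop (t + 1)).take M).reverse) % pvQ
            - pvOrd s2[t] * (13 ^ M % pvQ)) + pvOrd s2[t + (M + 1)]) % pvQ
      = (13 * ((pvOrd s2[t] * 13 ^ M + pvR ((s2.drop (t + 1)).take M).reverse)
            - pvOrd s2[t] * 13 ^ M) + pvOrd s2[t + (M + 1)]) % pvQ := h3
    _ = (pvR ((s2.drop (t + 1)).take M).reverse * 13 + pvOrd s2[t + (M + 1)]) % pvQ := by
        congr 1; ring

-- the two scanning loops agree
theorem pvLoop_main (f s2 : List Char) (k : Nat) : ∀ (t : Nat),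
    ((s2.length : Int) - (f.length : Int) - (t : Int) ≤ (k : Int)) →
    pvLoopA f s2 (13 ^ (f.length - 1) % pvQ) (pvP 0 f % pvQ)
        (pvP 0 ((s2.drop t).take f.length) % pvQ)
        (PySem.List.pyRange ((t : Int) + 1) ((s2.length : Int) - (f.length : Int) + 1) 1)
      = pvScanB (0 :: pvWinPref 0 s2) (f.length : Int) (13 ^ f.length % pvQ) (pvP 0 f % pvQ)
        (PySem.List.pyRange (t : Int) ((s2.length : Int) - (f.length : Int)) 1) := by
  induction k with
  | zero =>
      intro t ht
      rw [PySem.List.pyRange_one_eq_nil (by omega), PySem.List.pyRange_one_eq_nil (by omega)]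
      rfl
  | succ k ih =>
      intro t ht
      by_cases hlt : (t : Int) < (s2.length : Int) - (f.length : Int)
      · rw [PySem.List.pyRange_one_cons (a := (t : Int))
              (b := (s2.length : Int) - (f.length : Int)) (by omega),
            PySem.List.pyRange_one_cons (a := (t : Int) + 1)
              (b := (s2.length : Int) - (f.length : Int) + 1) (by omega)]
        simp only [pvLoopA, pvScanB]
        have htL : t + f.length < s2.length := by omega
        rw [pvWin_val s2 f t (by omega)]
        by_cases hc : pvP 0 ((s2.drop t).take f.length) % pvQ = pvP 0 f % pvQ
        · simp only [hc, beq_self_eq_true, if_true]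
          ring
        · have hbeq : (pvP 0 ((s2.drop t).take f.length) % pvQ == pvP 0 f % pvQ) = false := by
            simpa using hc
          rw [hbeq]
          simp only [Bool.false_eq_true, if_false]
          have hf : f ≠ [] := by
            intro h
            apply hc
            rw [h]
            simp [pvP]
          rw [pvRoll s2 f t htL hf]
          have h := ih (t + 1) (by push_cast; omega)
          push_cast at h
          convert h using 3
      · rw [PySem.List.pyRange_one_eq_nil (by omega), PySem.List.pyRange_one_eq_nil (by omega)]
        rfl

-- ===== VERDICT (by name: the statement is the Claim_ definition above) =====
theorem get_shift_size_spec : Claim_equal_get_shift_size := by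
  intro first_string second_string _
  unfold Spec_get_shift_size
  simp only [get_shift_size, get_shift_size_alt]
  by_cases hEq : (second_string == first_string) = true
  · simp [hEq]
  · simp only [hEq, Bool.false_eq_true, if_false]
    rw [pvFoldA_canon, pvFoldA_canon, ← pvP_zero, PySem.List.slice_to_natCast, ← pvP_zero,
        pvXt_val, pvHm_foldl, pvHm_zero, pvPrefixFold_fst, List.singleton_append, pvPow_fold]
    have h := pvLoop_main first_string.toList
        (second_string.toList ++ second_string.toList)
        (second_string.toList ++ second_string.toList).length 0
        (by push_cast; omega)
    push_cast at h
    simpa using h
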